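-- pv_equiv track=rewrite | github.com/SharanyaMarathe/Birthday_Reminder_TDD | date.py | newkeys_conditions1
-- ===== SOURCE A (Python) =====
-- def newkeys_conditions1(conditions1):
-- 	for key in range(3,7):
-- 		conditions1[key] = "Coming Sunday"
-- 	for key in range(-6,-2):
-- 		conditions1[key] = str((-1*key)) +" days before"
-- 	for key in range(8,14):
-- 		conditions1[key] = "Next Sunday"
-- 	for key in range(-13,-7):
-- 		conditions1[key] = "In the last week"
-- 	for key in range(-16,-13):
-- 		conditions1[key] = "2 weeks ago"
-- 	return conditions1
-- ===== SOURCE B (Python) =====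
-- # The reminder messages for each day-offset, written out as a fixed lookup table,
-- # grouped by message.
-- REMINDER_MESSAGES = {
--     # this week, before Sunday
--     3: "Coming Sunday", 4: "Coming Sunday", 5: "Coming Sunday", 6: "Coming Sunday",
--     # a few days ago
--     -6: "6 days before", -5: "5 days before", -4: "4 days before", -3: "3 days before",
--     # the week after
--     8: "Next Sunday", 9: "Next Sunday", 10: "Next Sunday", 11: "Next Sunday",
--     12: "Next Sunday", 13: "Next Sunday",
--     # last week
--     -13: "In the last week", -12: "In the last week", -11: "In the last week",
--     -10: "In the last week", -9: "In the last week", -8: "In the last week",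
--     # two weeks back
--     -16: "2 weeks ago", -15: "2 weeks ago", -14: "2 weeks ago",
-- }
--
-- def newkeys_conditions1(conditions1):
--     conditions1.update(REMINDER_MESSAGES)
--     return conditions1
-- ===== Notes on version B (the rewrite author's own statement) =====
-- stated objective: simpler
-- what changed: Replaces five range loops that compute each message (including a str() concatenation) with a fixed literal lookup table of all 23 key/message pairs and a single dict.update.
import Mathlib
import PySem

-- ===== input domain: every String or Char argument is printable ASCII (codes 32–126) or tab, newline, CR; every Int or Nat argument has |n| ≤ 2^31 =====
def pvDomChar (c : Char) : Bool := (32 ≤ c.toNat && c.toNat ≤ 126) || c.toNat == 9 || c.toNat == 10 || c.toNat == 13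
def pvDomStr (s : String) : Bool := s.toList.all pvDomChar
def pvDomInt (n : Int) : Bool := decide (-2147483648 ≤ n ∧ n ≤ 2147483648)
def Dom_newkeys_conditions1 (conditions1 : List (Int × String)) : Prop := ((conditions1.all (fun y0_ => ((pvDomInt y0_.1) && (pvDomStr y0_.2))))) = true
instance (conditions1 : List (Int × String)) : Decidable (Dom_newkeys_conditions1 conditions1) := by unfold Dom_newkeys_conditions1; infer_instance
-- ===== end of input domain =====

-- B replaces the five range loops by a fixed literal lookup table of all 23 key/message
-- pairs and a single dict.update (simpler); the Python dict argument is mutated in place —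
-- the equivalence proved here is about the returned dict's contents.

-- ===== PORT A =====
def newkeys_conditions1 (conditions1 : List (Int × String)) : List (Int × String) :=
  let d0 := PySem.Dict.ofList conditions1
  let d1 := (PySem.List.pyRange 3 7 1).foldl
    (fun d key => d.insert key "Coming Sunday") d0
  let d2 := (PySem.List.pyRange (-6) (-2) 1).foldl
    (fun d key => d.insert key (PySem.Int.toStr (-1 * key) ++ " days before")) d1
  let d3 := (PySem.List.pyRange 8 14 1).foldl
    (fun d key => d.insert key "Next Sunday") d2
  let d4 := (PySem.List.pyRange (-13) (-7) 1).foldl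
    (fun d key => d.insert key "In the last week") d3
  let d5 := (PySem.List.pyRange (-16) (-13) 1).foldl
    (fun d key => d.insert key "2 weeks ago") d4
  d5.items

-- ===== PORT B =====
-- the literal table REMINDER_MESSAGES (a dict literal; pairs in source order)
def pvReminderMessages : List (Int × String) :=
  [(3, "Coming Sunday"), (4, "Coming Sunday"), (5, "Coming Sunday"), (6, "Coming Sunday"),
   (-6, "6 days before"), (-5, "5 days before"), (-4, "4 days before"), (-3, "3 days before"),
   (8, "Next Sunday"), (9, "Next Sunday"), (10, "Next Sunday"), (11, "Next Sunday"),
   (12, "Next Sunday"), (13, "Next Sunday"),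
   (-13, "In the last week"), (-12, "In the last week"), (-11, "In the last week"),
   (-10, "In the last week"), (-9, "In the last week"), (-8, "In the last week"),
   (-16, "2 weeks ago"), (-15, "2 weeks ago"), (-14, "2 weeks ago")]

def newkeys_conditions1_alt (conditions1 : List (Int × String)) : List (Int × String) :=
  -- dict.update = insert each table pair in order
  (pvReminderMessages.foldl (fun d p => d.insert p.1 p.2)
    (PySem.Dict.ofList conditions1)).items

-- ===== PRECONDITION & SPEC =====
def Spec_newkeys_conditions1 (conditions1 : List (Int × String)) (out : List (Int × String)) : Prop := out = newkeys_conditions1_alt conditions1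
instance (conditions1 : List (Int × String)) (out : List (Int × String)) : Decidable (Spec_newkeys_conditions1 conditions1 out) := by unfold Spec_newkeys_conditions1; infer_instance

-- ===== CLAIM (what is proved, stated in full; the proofs are below) =====
def Claim_equal_newkeys_conditions1 : Prop := ∀ (conditions1 : List (Int × String)), Dom_newkeys_conditions1 conditions1 → Spec_newkeys_conditions1 conditions1 (newkeys_conditions1 conditions1)

-- ===== LEMMAS AND PROOFS =====

-- ===== VERDICT (by name: the statement is the Claim_ definition above) =====
theorem newkeys_conditions1_spec : Claim_equal_newkeys_conditions1 := by
  intro c _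
  show newkeys_conditions1 c = newkeys_conditions1_alt c
  have h1 : PySem.List.pyRange 3 7 1 = ([3,4,5,6] : List Int) := by decide
  have h2 : PySem.List.pyRange (-6) (-2) 1 = ([-6,-5,-4,-3] : List Int) := by decide
  have h3 : PySem.List.pyRange 8 14 1 = ([8,9,10,11,12,13] : List Int) := by decide
  have h4 : PySem.List.pyRange (-13) (-7) 1 = ([-13,-12,-11,-10,-9,-8] : List Int) := by decide
  have h5 : PySem.List.pyRange (-16) (-13) 1 = ([-16,-15,-14] : List Int) := by decide
  have t3 : PySem.Int.toStr (-1 * (-3)) ++ " days before" = "3 days before" := by decide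
  have t4 : PySem.Int.toStr (-1 * (-4)) ++ " days before" = "4 days before" := by decide
  have t5 : PySem.Int.toStr (-1 * (-5)) ++ " days before" = "5 days before" := by decide
  have t6 : PySem.Int.toStr (-1 * (-6)) ++ " days before" = "6 days before" := by decide
  simp only [newkeys_conditions1, newkeys_conditions1_alt, pvReminderMessages,
    h1, h2, h3, h4, h5, t3, t4, t5, t6, List.foldl_cons, List.foldl_nil]
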